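-- pv_equiv track=rewrite | github.com/tgen/jetstream_containers | tgen_phoenix/thred/thred/modules/functions.py | get_hrd_scores
-- ===== SOURCE A (Python) =====
-- def get_hrd_scores(dico_scores):
-- 	s_by_p = 0
-- 	s_by_q = 0
-- 	s = 0
-- 	for k in dico_scores.keys():
-- 		if "_p" in k:
-- 			s_by_p += dico_scores[k]
-- 		elif "_q" in k:
-- 			s_by_q += dico_scores[k]
-- 		else:
-- 			raise ValueError("ERROR arm NOT FOUND with Key {} in dico of scores".format(k))
-- 		s += dico_scores[k]
-- 	return s, s_by_p, s_by_q
-- ===== SOURCE B (Python) =====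
-- def get_hrd_scores(dico_scores):
-- 	for k in dico_scores:
-- 		if "_p" not in k and "_q" not in k:
-- 			raise ValueError("ERROR arm NOT FOUND with Key {} in dico of scores".format(k))
-- 	s = sum(dico_scores.values())
-- 	s_by_p = sum(v for k, v in dico_scores.items() if "_p" in k)
-- 	s_by_q = sum(v for k, v in dico_scores.items() if "_q" in k and "_p" not in k)
-- 	return s, s_by_p, s_by_q
-- ===== Notes on version B (the rewrite author's own statement) =====
-- stated objective: simpler
-- what changed: Replaces the single loop that accumulates three running sums (raising mid-accumulation) with a validation pass followed by three independent one-line summations over values/items.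
import Mathlib
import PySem

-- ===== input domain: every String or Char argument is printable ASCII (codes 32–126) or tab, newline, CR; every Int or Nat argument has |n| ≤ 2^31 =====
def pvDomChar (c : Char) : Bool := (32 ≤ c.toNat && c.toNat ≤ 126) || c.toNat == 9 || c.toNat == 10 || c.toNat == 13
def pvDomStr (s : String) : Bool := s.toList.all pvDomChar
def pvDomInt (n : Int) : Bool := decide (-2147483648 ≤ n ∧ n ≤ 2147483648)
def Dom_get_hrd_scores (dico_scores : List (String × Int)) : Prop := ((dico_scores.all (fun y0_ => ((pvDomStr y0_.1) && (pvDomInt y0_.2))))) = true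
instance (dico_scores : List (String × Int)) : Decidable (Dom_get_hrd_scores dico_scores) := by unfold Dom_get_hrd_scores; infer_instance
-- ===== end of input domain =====

-- B replaces A's single three-accumulator loop with a validation pass plus three independent summations (objective: simpler).


-- ===== PORT A =====
-- 'for k in dico_scores.keys(): … dico_scores[k]' is ported as a fold over the (key, value)
-- pairs in insertion order: a Python dict has unique keys, so dico_scores[k] is exactly the
-- pair's own value.  The raise is the 'none' of an Option-valued loop state; (0, 0, 0) stands
-- in outside Pre_ (where Python A raises ValueError).
def get_hrd_scores (dico_scores : List (String × Int)) : Int × Int × Int :=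
  (dico_scores.foldl
    (fun acc kv => acc.bind (fun st =>
      if PySem.Str.isIn "_p" kv.1 then some (st.1 + kv.2, st.2.1, st.2.2 + kv.2)
      else if PySem.Str.isIn "_q" kv.1 then some (st.1, st.2.1 + kv.2, st.2.2 + kv.2)
      else none))
    (some ((0 : Int), (0 : Int), (0 : Int)))).elim (0, 0, 0)
    (fun st => (st.2.2, st.1, st.2.1))

-- ===== PORT B =====
def get_hrd_scores_alt (dico_scores : List (String × Int)) : Int × Int × Int :=
  if dico_scores.all (fun kv => PySem.Str.isIn "_p" kv.1 || PySem.Str.isIn "_q" kv.1) then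
    ((dico_scores.map (·.2)).sum,
     ((dico_scores.filter (fun kv => PySem.Str.isIn "_p" kv.1)).map (·.2)).sum,
     ((dico_scores.filter (fun kv => PySem.Str.isIn "_q" kv.1 && !PySem.Str.isIn "_p" kv.1)).map (·.2)).sum)
  else (0, 0, 0)  -- Python B raises ValueError here (outside Pre_)

-- ===== PRECONDITION & SPEC =====
-- Pre_: every key contains "_p" or "_q"; on any other key Python A (and B) raises ValueError.
def Pre_get_hrd_scores (dico_scores : List (String × Int)) : Prop :=
  (dico_scores.all (fun kv => PySem.Str.isIn "_p" kv.1 || PySem.Str.isIn "_q" kv.1)) = true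
instance (dico_scores : List (String × Int)) : Decidable (Pre_get_hrd_scores dico_scores) := by unfold Pre_get_hrd_scores; infer_instance
def pvWitness_get_hrd_scores : (List (String × Int)) := [("hrd_p_arm", 3), ("hrd_q_arm", -2)]

def Spec_get_hrd_scores (dico_scores : List (String × Int)) (out : Int × Int × Int) : Prop := out = get_hrd_scores_alt dico_scores
instance (dico_scores : List (String × Int)) (out : Int × Int × Int) : Decidable (Spec_get_hrd_scores dico_scores out) := by unfold Spec_get_hrd_scores; infer_instance

-- ===== CLAIM (what is proved, stated in full; the proofs are below) =====
def Claim_equal_get_hrd_scores : Prop := ∀ (dico_scores : List (String × Int)), Dom_get_hrd_scores dico_scores → Pre_get_hrd_scores dico_scores → Spec_get_hrd_scores dico_scores (get_hrd_scores dico_scores)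

-- ===== LEMMAS AND PROOFS =====

-- Loop invariant for A's fold: on a valid list it never hits 'none' and adds B's three sums.
theorem hrd_fold_inv (l : List (String × Int)) (p q s : Int)
    (h : (l.all (fun kv => PySem.Str.isIn "_p" kv.1 || PySem.Str.isIn "_q" kv.1)) = true) :
    l.foldl
      (fun acc kv => acc.bind (fun st =>
        if PySem.Str.isIn "_p" kv.1 then some (st.1 + kv.2, st.2.1, st.2.2 + kv.2)
        else if PySem.Str.isIn "_q" kv.1 then some (st.1, st.2.1 + kv.2, st.2.2 + kv.2)
        else none))
      (some (p, q, s))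
    = some (p + ((l.filter (fun kv => PySem.Str.isIn "_p" kv.1)).map (·.2)).sum,
            q + ((l.filter (fun kv => PySem.Str.isIn "_q" kv.1 && !PySem.Str.isIn "_p" kv.1)).map (·.2)).sum,
            s + (l.map (·.2)).sum) := by
  induction l generalizing p q s with
  | nil => simp
  | cons kv rest ih =>
    simp only [List.all_cons, Bool.and_eq_true, Bool.or_eq_true] at h
    obtain ⟨hk, hrest⟩ := h
    rw [List.foldl_cons]
    simp only [Option.bind_some]
    by_cases hp : PySem.Str.isIn "_p" kv.1 = true
    · rw [if_pos hp, ih _ _ _ hrest, List.filter_cons, List.filter_cons,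
        if_pos hp, if_neg (by rw [hp]; simp)]
      simp only [List.map_cons, List.sum_cons, Option.some.injEq, Prod.mk.injEq]
      refine ⟨by ring, trivial, by ring⟩
    · have hq : PySem.Str.isIn "_q" kv.1 = true := by
        cases hk with
        | inl h => exact absurd h hp
        | inr h => exact h
      have hp' : PySem.Str.isIn "_p" kv.1 = false := Bool.eq_false_iff.mpr hp
      rw [if_neg hp, if_pos hq, ih _ _ _ hrest, List.filter_cons, List.filter_cons,
        if_neg hp, if_pos (show _ = true by rw [hq, hp']; rfl)]
      simp only [List.map_cons, List.sum_cons, Option.some.injEq, Prod.mk.injEq]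
      refine ⟨trivial, by ring, by ring⟩

-- ===== VERDICT (by name: the statement is the Claim_ definition above) =====
theorem get_hrd_scores_spec : Claim_equal_get_hrd_scores := by
  intro l _ hpre
  unfold Spec_get_hrd_scores get_hrd_scores get_hrd_scores_alt
  unfold Pre_get_hrd_scores at hpre
  rw [hrd_fold_inv l 0 0 0 hpre, if_pos hpre]
  simp
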